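-- pv_equiv track=rewrite | github.com/pypi-data/pypi-mirror-402 | packages/pepkit/pepkit-0.0.5.tar.gz/pepkit-0.0.5/pepkit/chem/conversion/utils.py | _find_unique_start
-- ===== SOURCE A (Python) =====
-- from typing import Dict, List, Optional
--
-- def _find_unique_start(ca_to_next: Dict[int, Optional[int]]) -> int:
--     """
--     Compute indegrees and return the unique start Cα (indegree==0).
--
--     :param ca_to_next: mapping Cα -> next Cα (or None).
--     :raises ValueError: if there is not exactly one start.
--     """
--     indeg: Dict[int, int] = {ca: 0 for ca in ca_to_next.keys()}
--     for nxt in ca_to_next.values():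
--         if nxt is not None:
--             indeg[nxt] = indeg.get(nxt, 0) + 1
--     starts = [ca for ca, d in indeg.items() if d == 0]
--     if len(starts) != 1:
--         raise ValueError(
--             "Ambiguous/invalid peptide ends; cyclic/branched not supported."
--         )
--     return starts[0]
-- ===== SOURCE B (Python) =====
-- from typing import Dict, Optional
--
-- def _find_unique_start(ca_to_next: Dict[int, Optional[int]]) -> int:
--     keys = sorted(ca_to_next)
--     rest = sorted(t for t in ca_to_next.values() if t is not None)
--     starts = []
--     for k in keys:
--         while rest and rest[0] < k:
--             rest = rest[1:]
--         if not rest or rest[0] != k: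
--             starts.append(k)
--     if len(starts) != 1:
--         raise ValueError(
--             "Ambiguous/invalid peptide ends; cyclic/branched not supported."
--         )
--     return starts[0]
-- ===== Notes on version B (the rewrite author's own statement) =====
-- stated objective: alternative
-- what changed: Replaces A's hash-based indegree counting by a sort-then-merge scan: both keys and non-None targets are sorted and a single two-pointer merge over the two sorted lists yields the keys that are not targets; no dictionary or hash lookups remain.
import Mathlib
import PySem

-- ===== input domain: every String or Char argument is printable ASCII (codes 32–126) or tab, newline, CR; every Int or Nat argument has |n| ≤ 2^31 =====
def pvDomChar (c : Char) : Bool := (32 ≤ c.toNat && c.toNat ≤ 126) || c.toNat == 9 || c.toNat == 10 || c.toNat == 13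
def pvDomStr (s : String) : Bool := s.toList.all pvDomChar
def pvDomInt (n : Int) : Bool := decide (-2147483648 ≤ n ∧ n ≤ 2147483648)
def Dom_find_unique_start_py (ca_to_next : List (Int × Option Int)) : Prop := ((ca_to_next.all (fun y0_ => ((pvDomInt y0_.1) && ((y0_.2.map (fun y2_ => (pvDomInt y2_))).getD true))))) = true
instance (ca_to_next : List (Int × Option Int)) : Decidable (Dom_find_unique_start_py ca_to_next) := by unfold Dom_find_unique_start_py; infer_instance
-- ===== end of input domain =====

-- B replaces A's hash-based indegree counting by sort-then-merge: both sorted lists are scanned once with two pointers (alternative algorithm, similar cost).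


-- ===== PORT A =====
def find_unique_start_py (ca_to_next : List (Int × Option Int)) : Int :=
  -- indeg = {ca: 0 for ca in ca_to_next.keys()}
  let indeg0 : PySem.Dict Int Int :=
    (ca_to_next.map Prod.fst).foldl (fun d ca => d.insert ca 0) PySem.Dict.empty
  -- for nxt in ca_to_next.values(): if nxt is not None: indeg[nxt] = indeg.get(nxt, 0) + 1
  let indeg : PySem.Dict Int Int :=
    (ca_to_next.map Prod.snd).foldl
      (fun d nxt =>
        match nxt with
        | some n => d.insert n (d.getD n 0 + 1)
        | none => d) indeg0
  -- starts = [ca for ca, d in indeg.items() if d == 0]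
  let starts := ((indeg.items.filter (fun p => p.2 == 0)).map Prod.fst)
  -- if len(starts) != 1: raise ValueError(...)  -- those inputs are outside Pre_
  if starts.length ≠ 1 then 0
  else PySem.List.pyGetD starts 0 0  -- return starts[0]

-- ===== PORT B =====
-- while rest and rest[0] < k: rest = rest[1:]
def pvSkip (rest : List Int) (k : Int) : List Int :=
  match rest with
  | [] => []
  | t :: r => if t < k then pvSkip r k else t :: r

-- for k in keys: …skip…; if not rest or rest[0] != k: starts.append(k)
def pvMerge (keys : List Int) (rest : List Int) (starts : List Int) : List Int :=
  match keys with
  | [] => starts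
  | k :: ks =>
      let rest' := pvSkip rest k
      match rest' with
      | [] => pvMerge ks rest' (starts ++ [k])
      | t :: _ => pvMerge ks rest' (if t ≠ k then starts ++ [k] else starts)

def find_unique_start_py_alt (ca_to_next : List (Int × Option Int)) : Int :=
  -- keys = sorted(ca_to_next)
  let keys := PySem.List.sorted (ca_to_next.map Prod.fst) (fun x => x) false
  -- rest = sorted(t for t in ca_to_next.values() if t is not None)
  let rest := PySem.List.sorted ((ca_to_next.map Prod.snd).filterMap id) (fun x => x) false
  let starts := pvMerge keys rest []
  -- if len(starts) != 1: raise ValueError(...)  -- those inputs are outside Pre_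
  if starts.length ≠ 1 then 0
  else PySem.List.pyGetD starts 0 0  -- return starts[0]

-- ===== PRECONDITION & SPEC =====
-- Pre_ excludes (a) association lists with duplicate keys, which are not the image of any
-- Python dict (the Pythons receive a dict, so no dict input is excluded by this), and
-- (b) inputs without exactly one start key, on which both Pythons raise ValueError.
def Pre_find_unique_start_py (ca_to_next : List (Int × Option Int)) : Prop :=
  (ca_to_next.map Prod.fst).Nodup ∧
  ((ca_to_next.map Prod.fst).countP
      (fun ca => !(((ca_to_next.map Prod.snd).filterMap id).contains ca))) = 1
instance (ca_to_next : List (Int × Option Int)) : Decidable (Pre_find_unique_start_py ca_to_next) := by unfold Pre_find_unique_start_py; infer_instance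

def pvWitness_find_unique_start_py : (List (Int × Option Int)) := [(1, some 2), (2, none)]

def Spec_find_unique_start_py (ca_to_next : List (Int × Option Int)) (out : Int) : Prop := out = find_unique_start_py_alt ca_to_next
instance (ca_to_next : List (Int × Option Int)) (out : Int) : Decidable (Spec_find_unique_start_py ca_to_next out) := by unfold Spec_find_unique_start_py; infer_instance

-- ===== CLAIM (what is proved, stated in full; the proofs are below) =====
def Claim_equal_find_unique_start_py : Prop := ∀ (ca_to_next : List (Int × Option Int)), Dom_find_unique_start_py ca_to_next → Pre_find_unique_start_py ca_to_next → Spec_find_unique_start_py ca_to_next (find_unique_start_py ca_to_next)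

-- ===== LEMMAS AND PROOFS =====

-- A's first loop inserts value 0 at every key, so every lookup with default 0 is 0.
theorem pv_getD_init (l : List Int) (d : PySem.Dict Int Int) (k : Int) (h : d.getD k 0 = 0) :
    (l.foldl (fun d ca => d.insert ca 0) d).getD k 0 = 0 := by
  induction l generalizing d with
  | nil => simpa using h
  | cons a l ih =>
      simp only [List.foldl_cons]
      exact ih _ (by rw [PySem.Dict.getD_insert]; split_ifs <;> simp [h])

-- A's second loop, which skips None, is the counter loop over the non-None values.
theorem pv_optFold (l : List (Option Int)) (d : PySem.Dict Int Int) :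
    l.foldl (fun d nxt =>
      match nxt with
      | some n => d.insert n (d.getD n 0 + 1)
      | none => d) d
    = (l.filterMap id).foldl (fun d n => d.insert n (d.getD n 0 + 1)) d := by
  induction l generalizing d with
  | nil => rfl
  | cons a l ih => cases a <;> simp [List.foldl_cons, ih]

-- PySem.Set.update only ever appends, and appends only elements of its argument.
theorem pv_update_split (tg : List Int) (s : PySem.Set Int) :
    ∃ t : List Int, PySem.Set.update s tg = s ++ t ∧ ∀ x ∈ t, x ∈ tg := by
  induction tg generalizing s with
  | nil => exact ⟨[], by simp [PySem.Set.update], by simp⟩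
  | cons a tg ih =>
      have hupd : PySem.Set.update s (a :: tg) = PySem.Set.update (PySem.Set.add s a) tg := by
        simp [PySem.Set.update]
      by_cases hc : a ∈ s
      · have hadd : PySem.Set.add s a = s := by simp [PySem.Set.add, hc]
        obtain ⟨t, ht, hmem⟩ := ih s
        exact ⟨t, by rw [hupd, hadd, ht], fun x hx => List.mem_cons_of_mem _ (hmem x hx)⟩
      · have hadd : PySem.Set.add s a = s ++ [a] := by
          simp [PySem.Set.add, hc]
        obtain ⟨t, ht, hmem⟩ := ih (s ++ [a])
        refine ⟨a :: t, ?_, ?_⟩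
        · rw [hupd, hadd, ht]; simp
        · intro x hx
          rcases List.mem_cons.mp hx with h | h
          · exact h ▸ List.mem_cons_self
          · exact List.mem_cons_of_mem _ (hmem x h)

-- A's starts list is the keys (in input order) that never occur as a non-None value.
theorem pv_starts_eq (m : List (Int × Option Int)) (hnd : (m.map Prod.fst).Nodup) :
    ((((m.map Prod.snd).foldl
        (fun d nxt =>
          match nxt with
          | some n => d.insert n (d.getD n 0 + 1)
          | none => d)
        ((m.map Prod.fst).foldl (fun d ca => d.insert ca 0)
          (PySem.Dict.empty : PySem.Dict Int Int))).items.filter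
          (fun p => p.2 == 0)).map Prod.fst)
    = (m.map Prod.fst).filter
        (fun ca => !(((m.map Prod.snd).filterMap id).contains ca)) := by
  set keys := m.map Prod.fst with hkeys
  set tg := (m.map Prod.snd).filterMap id with htg
  set d0 := keys.foldl (fun d ca => d.insert ca 0) (PySem.Dict.empty : PySem.Dict Int Int) with hd0
  rw [pv_optFold]
  set D := tg.foldl (fun d n => d.insert n (d.getD n 0 + 1)) d0 with hD
  have hd0keys : d0.keys = keys := by
    have := PySem.Dict.items_foldl_insert_fresh keys (k := fun a => a) (v := fun _ => (0 : Int))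
      (d := PySem.Dict.empty) (by simp) (by simpa using hnd)
    rw [hd0]
    simp only [PySem.Dict.keys, this]
    have h2 : ((fun x : Int × Int => x.1) ∘ fun a : Int => (a, (0 : Int))) = id := rfl
    simp [PySem.Dict.empty, h2]
  have hd0nd : d0.keys.Nodup := by rw [hd0keys]; exact hnd
  have hcnt : ∀ k : Int, D.getD k 0 = tg.count k := by
    intro k
    rw [hD, PySem.Dict.getD_foldl_insert_add_one]
    rw [hd0, pv_getD_init _ _ _ (by simp)]
    simp
  have hDkeys : D.keys = PySem.Set.update d0.keys tg :=
    PySem.Dict.keys_foldl_insert tg (fun d n => d.getD n 0 + 1) d0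
  have hDnd : D.keys.Nodup := PySem.Dict.nodup_keys_foldl_insert tg _ d0 hd0nd
  obtain ⟨t, ht, htmem⟩ := pv_update_split tg d0.keys
  rw [PySem.Dict.items_eq_map_keys D hDnd 0]
  rw [List.filter_map, List.map_map]
  have hpred : (fun p : Int × Int => p.2 == 0) ∘ (fun k => (k, D.getD k 0))
      = fun k => D.getD k 0 == 0 := rfl
  rw [hpred, hDkeys, ht, hd0keys, List.filter_append]
  have htnil : t.filter (fun k => D.getD k 0 == 0) = [] := by
    rw [List.filter_eq_nil_iff]
    intro x hx
    have hxtg : x ∈ tg := htmem x hx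
    have : tg.count x ≠ 0 := by
      simpa [List.count_eq_zero] using hxtg
    simp [hcnt x, this]
  rw [htnil, List.append_nil]
  have : (Prod.fst ∘ fun k : Int => (k, D.getD k 0)) = id := rfl
  rw [this, List.map_id]
  apply List.filter_congr
  intro x _
  by_cases hx : x ∈ tg
  · have : tg.count x ≠ 0 := by simpa [List.count_eq_zero] using hx
    simp [hcnt x, this, hx]
  · have : tg.count x = 0 := List.count_eq_zero.mpr hx
    simp [hcnt x, this, hx]

-- pvSkip drops only elements < k, so membership of any x ≥ k is unchanged.
theorem pv_skip_mem (rest : List Int) (k x : Int) (hkx : k ≤ x) :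
    x ∈ pvSkip rest k ↔ x ∈ rest := by
  induction rest with
  | nil => simp [pvSkip]
  | cons t r ih =>
      by_cases h : t < k
      · have hxt : x ≠ t := by omega
        simp [pvSkip, h, ih, hxt]
      · simp [pvSkip, h]

-- pvSkip returns a suffix, so sortedness is preserved.
theorem pv_skip_pairwise (rest : List Int) (k : Int)
    (h : rest.Pairwise (· ≤ ·)) : (pvSkip rest k).Pairwise (· ≤ ·) := by
  induction rest with
  | nil => simp [pvSkip]
  | cons t r ih =>
      by_cases hc : t < k
      · simp only [pvSkip, if_pos hc]
        exact ih (List.Pairwise.of_cons h)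
      · simpa [pvSkip, hc] using h

-- pvSkip's head (if any) is ≥ k.
theorem pv_skip_head (rest : List Int) (k : Int) :
    ∀ t r, pvSkip rest k = t :: r → k ≤ t := by
  induction rest with
  | nil => intro t r h; simp [pvSkip] at h
  | cons a l ih =>
      intro t r h
      by_cases hc : a < k
      · exact ih t r (by simpa [pvSkip, hc] using h)
      · rw [pvSkip, if_neg hc] at h
        cases h; omega

-- The merge scan over two sorted lists computes the membership filter.
theorem pv_merge_eq (keys : List Int) (rest starts : List Int)
    (hk : keys.Pairwise (· < ·)) (hr : rest.Pairwise (· ≤ ·)) :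
    pvMerge keys rest starts = starts ++ keys.filter (fun k => !(rest.contains k)) := by
  induction keys generalizing rest starts with
  | nil => simp [pvMerge]
  | cons k ks ih =>
      have hks : ks.Pairwise (· < ·) := List.Pairwise.of_cons hk
      have hlt : ∀ x ∈ ks, k < x := fun x hx => List.rel_of_pairwise_cons hk hx
      have hr' : (pvSkip rest k).Pairwise (· ≤ ·) := pv_skip_pairwise rest k hr
      -- membership in pvSkip rest k of the head k is decided by the new head
      have hmemk : (k ∈ pvSkip rest k) ↔ (∃ t r, pvSkip rest k = t :: r ∧ t = k) := by
        constructor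
        · intro hmem
          cases hsk : pvSkip rest k with
          | nil => rw [hsk] at hmem; simp at hmem
          | cons t r =>
              refine ⟨t, r, rfl, ?_⟩
              rw [hsk] at hmem
              rcases List.mem_cons.mp hmem with h | h
              · omega
              · have hkt : k ≤ t := pv_skip_head rest k t r hsk
                have : ∀ y ∈ r, t ≤ y := by
                  rw [hsk] at hr'
                  exact fun y hy => List.rel_of_pairwise_cons hr' hy
                have := this k h
                omega
        · rintro ⟨t, r, hsk, rfl⟩; rw [hsk]; exact List.mem_cons_self
      have hkrest : (k ∈ rest) ↔ (k ∈ pvSkip rest k) := (pv_skip_mem rest k k le_rfl).symm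
      -- the filter over ks is the same for rest and pvSkip rest k
      have hfilt : ks.filter (fun x => !(rest.contains x))
          = ks.filter (fun x => !((pvSkip rest k).contains x)) := by
        apply List.filter_congr
        intro x hx
        have : (x ∈ pvSkip rest k) ↔ (x ∈ rest) :=
          pv_skip_mem rest k x (le_of_lt (hlt x hx))
        simp [this]
      cases hsk : pvSkip rest k with
      | nil =>
          have hnk : k ∉ rest := by
            rw [hkrest, hsk]; simp
          rw [pvMerge, hsk]
          rw [ih _ _ hks (by simp)]
          rw [List.filter_cons_of_pos (by simpa using hnk)]
          rw [hfilt, hsk]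
          simp
      | cons t r =>
          rw [pvMerge, hsk]
          have hr'' : (t :: r).Pairwise (· ≤ ·) := hsk ▸ hr'
          by_cases htk : t = k
          · have hink : k ∈ rest := by
              rw [hkrest, hsk, htk]; exact List.mem_cons_self
            dsimp only
            rw [if_neg (by simpa using htk)]
            rw [ih _ _ hks hr'']
            rw [List.filter_cons_of_neg (by simpa using hink)]
            rw [hfilt, hsk]
          · have hnk : k ∉ rest := by
              rw [hkrest, hmemk]
              rintro ⟨t', r', heq, rfl⟩
              rw [hsk] at heq; cases heq; exact htk rfl
            dsimp only
            rw [if_pos (by simpa using htk)]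
            rw [ih _ _ hks hr'']
            rw [List.filter_cons_of_pos (by simpa using hnk)]
            rw [hfilt, hsk]
            simp

-- ===== VERDICT (by name: the statement is the Claim_ definition above) =====
theorem find_unique_start_py_spec : Claim_equal_find_unique_start_py := by
  intro m _ hpre
  unfold Spec_find_unique_start_py
  obtain ⟨hnd, hcnt⟩ := hpre
  dsimp only [find_unique_start_py, find_unique_start_py_alt]
  rw [pv_starts_eq m hnd]
  set keys := m.map Prod.fst with hkeys
  set tg := (m.map Prod.snd).filterMap id with htg
  set skeys := PySem.List.sorted keys (fun x => x) false with hskeys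
  set srest := PySem.List.sorted tg (fun x => x) false with hsrest
  have hperm : skeys.Perm keys := PySem.List.sorted_perm keys (fun x => x) false
  have hsnd : skeys.Nodup := hperm.nodup_iff.mpr hnd
  have hsle : skeys.Pairwise (· ≤ ·) := by
    have := PySem.List.sorted_pairwise keys (fun x => x)
    simpa using this
  have hslt : skeys.Pairwise (· < ·) := by
    have hne : skeys.Pairwise (· ≠ ·) := hsnd
    exact (List.Pairwise.and hsle hne).imp (fun h => lt_of_le_of_ne h.1 h.2)
  have hrle : srest.Pairwise (· ≤ ·) := by
    have := PySem.List.sorted_pairwise tg (fun x => x)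
    simpa using this
  have hrperm : srest.Perm tg := PySem.List.sorted_perm tg (fun x => x) false
  rw [pv_merge_eq skeys srest [] hslt hrle, List.nil_append]
  -- the membership predicate over srest equals the one over tg
  have hpredeq : ∀ x, (!(srest.contains x)) = (!(tg.contains x)) := by
    intro x
    simp [hrperm.mem_iff]
  have hfeq : skeys.filter (fun k => !(srest.contains k))
      = skeys.filter (fun k => !(tg.contains k)) := by
    apply List.filter_congr; intro x _; exact hpredeq x
  rw [hfeq]
  -- A's starts and B's starts are permutations; both have length 1, hence equal
  have hfperm : (skeys.filter (fun k => !(tg.contains k))).Perm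
      (keys.filter (fun k => !(tg.contains k))) := hperm.filter _
  have hlenA : (keys.filter (fun k => !(tg.contains k))).length = 1 := by
    simpa [← List.countP_eq_length_filter] using hcnt
  have hlenB : (skeys.filter (fun k => !(tg.contains k))).length = 1 :=
    hfperm.length_eq.trans hlenA
  obtain ⟨a, ha⟩ := List.length_eq_one_iff.mp hlenA
  obtain ⟨b, hb⟩ := List.length_eq_one_iff.mp hlenB
  have hab : a = b := by
    have := hfperm
    rw [ha, hb] at this
    simpa using this.symm
  rw [ha, hb, hab]
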